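-- pv_equiv track=rewrite | github.com/hparik11/interview_questions | amazon_largest_associate.py | largest_item_association
-- ===== SOURCE A (Python) =====
-- from collections import defaultdict
--
-- class Graph:
--     def __init__(self):
--         self.graph = defaultdict(list)
--
--     def add_edge(self, u, v):
--         if v is None:
--             self.graph[u] = []
--         else:
--             self.graph[u].append(v)
--             self.graph[v].append(u)
--
-- def largest_item_association(item_association):
--
--     def dfs(node, graph, curr_group, visited):
--         if node in visited:
--             return
--         visited[node] = True
--
--         for neigh in graph[node]:
--             if neigh not in visited:
--                 curr_group.append(neigh)
--                 dfs(neigh, graph, curr_group, visited)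
--
--     graph = Graph()
--     for each in item_association:
--         if len(each) == 1:
--             graph.add_edge(each[0], None)
--         else:
--             graph.add_edge(each[0], each[1])
--
--     graphDict = graph.graph
--
--     visited = defaultdict(bool)
--     largest_group = []
--
--     for each in graph.graph:
--         curr_group = []
--         if each not in visited:
--             curr_group.append(each)
--             dfs(each, graphDict, curr_group, visited)
--
--             if len(curr_group) > len(largest_group):
--                 largest_group = sorted(curr_group)
--             elif len(curr_group) == len(largest_group):
--                 if sorted(curr_group)[0] < sorted(largest_group)[0]:
--                     largest_group = sorted(curr_group)
--
--     return largest_group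
-- ===== SOURCE B (Python) =====
-- def largest_item_association(item_association):
--     graph = {}
--     for each in item_association:
--         if len(each) == 1:
--             graph[each[0]] = []
--         else:
--             u, v = each[0], each[1]
--             graph.setdefault(u, []).append(v)
--             graph.setdefault(v, []).append(u)
--
--     visited = set()
--     best = []
--     for start in graph:
--         if start in visited:
--             continue
--         group = []
--         stack = [start]
--         while stack:
--             x = stack.pop()
--             if x in visited:
--                 continue
--             visited.add(x)
--             group.append(x)
--             for y in graph[x]:
--                 if y not in visited:
--                     stack.append(y)
--         group.sort()
--         if len(group) > len(best) or (len(group) == len(best) and group[0] < best[0]):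
--             best = group
--     return best
-- ===== Notes on version B (the rewrite author's own statement) =====
-- stated objective: alternative
-- what changed: Replaces the recursive DFS with an iterative explicit-stack traversal (pop, mark visited, push unvisited neighbours) and folds A's three-way best-group update into one combined comparison; the graph is built with dict.setdefault instead of a defaultdict-backed Graph class.
import Mathlib
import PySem

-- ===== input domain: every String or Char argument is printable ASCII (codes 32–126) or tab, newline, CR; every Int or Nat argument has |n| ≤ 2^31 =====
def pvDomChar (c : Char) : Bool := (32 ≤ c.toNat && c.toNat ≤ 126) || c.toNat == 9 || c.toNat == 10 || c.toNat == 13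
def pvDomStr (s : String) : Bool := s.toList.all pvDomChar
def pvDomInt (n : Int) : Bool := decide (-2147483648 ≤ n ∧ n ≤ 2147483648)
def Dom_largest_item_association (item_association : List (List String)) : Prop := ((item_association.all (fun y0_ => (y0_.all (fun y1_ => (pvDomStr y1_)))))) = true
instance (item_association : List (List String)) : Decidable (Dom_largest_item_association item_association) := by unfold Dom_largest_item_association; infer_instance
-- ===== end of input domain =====

-- B replaces A's recursive DFS by an iterative explicit-stack traversal and a combined
-- best-group update (alternative decomposition, same cost); equal return values proved on Pre_.

-- ===== PORT A =====

-- Graph.add_edge: graph[u] = [] for a 1-element row; otherwise append v to graph[u] and u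
-- to graph[v] (defaultdict: a missing key reads as []; assignment/first access appends the key).
def pvAddEdgeA (g : PySem.Dict String (List String)) (u : String) (v : Option String) :
    PySem.Dict String (List String) :=
  match v with
  | none => g.insert u []
  | some v =>
    let g1 := g.insert u (g.getD u [] ++ [v])
    g1.insert v (g1.getD v [] ++ [u])

-- the loop 'for each in item_association: …' building graph (rows [] are outside Pre_; the
-- Python raises IndexError there, the port leaves the graph unchanged on such a row)
def pvBuildA (rows : List (List String)) : PySem.Dict String (List String) :=
  rows.foldl
    (fun g each =>
      match each with
      | [] => g
      | [u] => pvAddEdgeA g u none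
      | u :: v :: _ => pvAddEdgeA g u (some v))
    PySem.Dict.empty

-- the recursive dfs; fuel (> number of graph keys at every actual call) only makes the
-- recursion structural, it is never exhausted on the calls the main function makes.
-- graph[node] is read as getD node [] (every node dfs ever sees is a key of the graph).
def pvDfsA (g : PySem.Dict String (List String)) :
    Nat → String → (List String × PySem.Dict String Bool) →
    (List String × PySem.Dict String Bool)
  | 0, _, st => st
  | (f+1), node, (curr, vis) =>
    if vis.contains node then (curr, vis)
    else
      (g.getD node []).foldl
        (fun st neigh =>
          if st.2.contains neigh then st
          else pvDfsA g f neigh (st.1 ++ [neigh], st.2))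
        (curr, vis.insert node true)

def largest_item_association (item_association : List (List String)) : List String :=
  let g := pvBuildA item_association
  let res :=
    (PySem.Dict.keys g).foldl
      (fun (st : List String × PySem.Dict String Bool) each =>
        let largest := st.1
        let vis := st.2
        if ¬ (vis.contains each) then
          let r := pvDfsA g (PySem.Dict.size g + 1) each ([each], vis)
          let curr := r.1
          if curr.length > largest.length then
            (PySem.List.sorted curr (fun x => x) false, r.2)
          else if curr.length = largest.length then
            -- sorted(curr_group)[0] < sorted(largest_group)[0]; both groups are nonempty
            -- whenever this branch runs, so the pyGetD default "" is never used
            if PySem.List.pyGetD (PySem.List.sorted curr (fun x => x) false) 0 "" <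
               PySem.List.pyGetD (PySem.List.sorted largest (fun x => x) false) 0 "" then
              (PySem.List.sorted curr (fun x => x) false, r.2)
            else (largest, r.2)
          else (largest, r.2)
        else (largest, vis))
      ([], PySem.Dict.empty)
  res.1

-- ===== PORT B =====

-- graph built with setdefault(_, []).append(…) on a plain dict
def pvBuildB (rows : List (List String)) : PySem.Dict String (List String) :=
  rows.foldl
    (fun g each =>
      match each with
      | [] => g
      | [u] => g.insert u []
      | u :: v :: _ =>
        let g1 := (g.setdefault u []).insert u ((g.setdefault u []).getD u [] ++ [v])
        (g1.setdefault v []).insert v ((g1.setdefault v []).getD v [] ++ [u]))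
    PySem.Dict.empty

-- the while loop: stack modelled head-as-top (Python append/pop() work at the list's end),
-- so pushing the neighbour loop is a foldl that conses each kept neighbour; fuel (never
-- exhausted at the fuel the main function passes) makes the loop structural.
def pvLoopB (g : PySem.Dict String (List String)) :
    Nat → List String → PySem.Set String → List String →
    (PySem.Set String × List String)
  | 0, _, vis, group => (vis, group)
  | (f+1), stack, vis, group =>
    match stack with
    | [] => (vis, group)
    | x :: rest =>
      if PySem.Set.contains vis x then pvLoopB g f rest vis group
      else
        let vis' := PySem.Set.add vis x
        let stack' :=
          (g.getD x []).foldl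
            (fun st y => if PySem.Set.contains vis' y then st else y :: st) rest
        pvLoopB g f stack' vis' (group ++ [x])

def largest_item_association_alt (item_association : List (List String)) : List String :=
  let g := pvBuildB item_association
  let res :=
    (PySem.Dict.keys g).foldl
      (fun (st : List String × PySem.Set String) start =>
        let best := st.1
        let vis := st.2
        if PySem.Set.contains vis start then (best, vis)
        else
          let r := pvLoopB g (1 + PySem.Dict.size g + ((PySem.Dict.values g).map List.length).sum)
                     [start] vis []
          let sg := PySem.List.sorted r.2 (fun x => x) false
          if sg.length > best.length ∨
             (sg.length = best.length ∧
              PySem.List.pyGetD sg 0 "" < PySem.List.pyGetD best 0 "") then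
            (sg, r.1)
          else (best, r.1))
      ([], PySem.Set.empty)
  res.1

-- ===== PRECONDITION & SPEC =====
-- Pre_ excludes inputs containing an empty row: there Python A raises IndexError on each[0]
-- (and Python B raises identically); A returns on every other input.
def Pre_largest_item_association (item_association : List (List String)) : Prop :=
  [] ∉ item_association
instance (item_association : List (List String)) : Decidable (Pre_largest_item_association item_association) := by
  unfold Pre_largest_item_association; infer_instance

def pvWitness_largest_item_association : List (List String) :=
  [["a", "b"], ["c"], ["b", "d"], ["e", "f"]]

def Spec_largest_item_association (item_association : List (List String)) (out : List String) : Prop := out = largest_item_association_alt item_association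
instance (item_association : List (List String)) (out : List String) : Decidable (Spec_largest_item_association item_association out) := by unfold Spec_largest_item_association; infer_instance

-- ===== CLAIM (what is proved, stated in full; the proofs are below) =====
def Claim_equal_largest_item_association : Prop := ∀ (item_association : List (List String)), Dom_largest_item_association item_association → Pre_largest_item_association item_association → Spec_largest_item_association item_association (largest_item_association item_association)

-- ===== LEMMAS AND PROOFS =====

-- A set-of-sources reachability predicate: x is reachable from a source in S through
-- edges of g, never entering a node satisfying v (the already-visited nodes).
inductive PvReach (g : PySem.Dict String (List String)) (v : String → Prop) (S : String → Prop) : String → Prop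
  | base {x} : S x → ¬ v x → PvReach g v S x
  | step {x y} : PvReach g v S x → y ∈ g.getD x [] → ¬ v y → PvReach g v S y

theorem pvReach_congr_mp {g : PySem.Dict String (List String)} {v v' S S' : String → Prop} {x : String}
    (hv : ∀ z, v z ↔ v' z) (hS : ∀ z, ¬ v z → (S z → S' z)) (h : PvReach g v S x) :
    PvReach g v' S' x := by
  induction h with
  | base hx hvx => exact .base (hS _ hvx hx) (fun c => hvx ((hv _).mpr c))
  | step _ hy hvy ih => exact .step ih hy (fun c => hvy ((hv _).mpr c))

theorem pvReach_congr {g : PySem.Dict String (List String)} {v v' S S' : String → Prop} {x : String}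
    (hv : ∀ z, v z ↔ v' z) (hS : ∀ z, ¬ v z → (S z ↔ S' z)) :
    PvReach g v S x ↔ PvReach g v' S' x := by
  constructor
  · exact pvReach_congr_mp hv (fun z hz => (hS z hz).mp)
  · exact pvReach_congr_mp (fun z => (hv z).symm)
      (fun z hz => (hS z (fun c => hz ((hv z).mp c))).mpr)

theorem pvReach_none {g : PySem.Dict String (List String)} {v S : String → Prop} {x : String}
    (hS : ∀ z, ¬ S z) (h : PvReach g v S x) : False := by
  induction h with
  | base hx _ => exact hS _ hx
  | step _ _ _ ih => exact ih

-- splitting the source set: reach from S1 ∪ S2 = reach from S1, plus reach from S2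
-- additionally avoiding everything reached from S1
theorem pvReach_split {g : PySem.Dict String (List String)} {v S1 S2 : String → Prop} {x : String} :
    PvReach g v (fun z => S1 z ∨ S2 z) x ↔
      (PvReach g v S1 x ∨ PvReach g (fun z => v z ∨ PvReach g v S1 z) S2 x) := by
  constructor
  · intro h
    induction h with
    | @base z hx hvx =>
      rcases hx with h1 | h2
      · exact Or.inl (.base h1 hvx)
      · by_cases hr : PvReach g v S1 z
        · exact Or.inl hr
        · exact Or.inr (.base h2 (by tauto))
    | @step z y hz hy hvy ih =>
      by_cases hr : PvReach g v S1 y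
      · exact Or.inl hr
      · rcases ih with h1 | h1
        · exact Or.inl (.step h1 hy hvy)
        · exact Or.inr (.step h1 hy (by tauto))
  · intro h
    rcases h with h | h
    · exact pvReach_congr_mp (fun z => Iff.rfl) (fun z _ => Or.inl) h
    · induction h with
      | @base z hx hvx => exact .base (Or.inr hx) (by tauto)
      | @step z y hz hy hvy ih => exact .step ih hy (by tauto)

-- unfolding one unvisited source t: reach from {t} ∪ S = {t} plus reach from
-- (neighbours of t) ∪ S avoiding additionally t itself
theorem pvReach_expand {g : PySem.Dict String (List String)} {v S : String → Prop} {t x : String}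
    (ht : ¬ v t) :
    PvReach g v (fun z => z = t ∨ S z) x ↔
      (x = t ∨ PvReach g (fun z => v z ∨ z = t) (fun z => z ∈ g.getD t [] ∨ S z) x) := by
  constructor
  · intro h
    induction h with
    | @base z hx hvx =>
      rcases hx with h1 | h2
      · exact Or.inl h1
      · by_cases he : z = t
        · exact Or.inl he
        · exact Or.inr (.base (Or.inr h2) (by tauto))
    | @step z y hz hy hvy ih =>
      by_cases he : y = t
      · exact Or.inl he
      · rcases ih with h1 | h1
        · subst h1
          exact Or.inr (.base (Or.inl hy) (by tauto))
        · exact Or.inr (.step h1 hy (by tauto))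
  · intro h
    rcases h with h | h
    · subst h; exact .base (Or.inl rfl) ht
    · induction h with
      | @base z hx hvx =>
        rcases hx with h1 | h1
        · exact .step (.base (Or.inl rfl) ht) h1 (by tauto)
        · exact .base (Or.inr h1) (by tauto)
      | @step z y hz hy hvy ih =>
        exact .step ih hy (by tauto)

-- ---- generic list counting helpers ----

theorem pvFilter_len_mono {α : Type} (l : List α) (p q : α → Bool)
    (h : ∀ a, q a = true → p a = true) : (l.filter q).length ≤ (l.filter p).length := by
  induction l with
  | nil => simp
  | cons a t ih =>
    simp only [List.filter_cons]
    rcases Bool.eq_false_or_eq_true (q a) with hq | hq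
    · simp [hq, h a hq]; omega
    · rcases Bool.eq_false_or_eq_true (p a) with hp | hp <;> simp [hq, hp] <;> omega

theorem pvFilter_len_lt {α : Type} [DecidableEq α] (l : List α) (p q : α → Bool) (n : α)
    (h : ∀ a, q a = true → p a = true) (hn : n ∈ l) (hp : p n = true) (hq : q n = false) :
    (l.filter q).length < (l.filter p).length := by
  induction l with
  | nil => cases hn
  | cons a t ih =>
    simp only [List.filter_cons]
    by_cases ha : a = n
    · subst ha
      have := pvFilter_len_mono t p q h
      simp [hp, hq]
      omega
    · have hn' : n ∈ t := by
        rcases List.mem_cons.mp hn with h1 | h1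
        · exact absurd h1.symm ha
        · exact h1
      have := ih hn'
      rcases Bool.eq_false_or_eq_true (q a) with hqa | hqa
      · simp [hqa, h a hqa]; omega
      · rcases Bool.eq_false_or_eq_true (p a) with hpa | hpa <;> simp [hqa, hpa] <;> omega

-- number of not-yet-visited keys of the graph (A's visited is a Dict String Bool)
def pvUCount (g : PySem.Dict String (List String)) (vis : PySem.Dict String Bool) : Nat :=
  ((g.keys).filter (fun k => ! vis.contains k)).length

theorem pvUCount_le_size (g : PySem.Dict String (List String)) (vis : PySem.Dict String Bool) :
    pvUCount g vis ≤ g.size := by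
  have h := List.length_filter_le (fun k => ! vis.contains k) g.keys
  have h2 : g.keys.length = g.size := by
    show (g.items.map Prod.fst).length = g.items.length
    simp
  unfold pvUCount
  omega

theorem pvUCount_lt (g : PySem.Dict String (List String)) (vis vis' : PySem.Dict String Bool)
    (n : String)
    (h1 : ∀ z, vis.contains z = true → vis'.contains z = true)
    (h2 : vis'.contains n = true) (h3 : vis.contains n = false) (hn : n ∈ g.keys) :
    pvUCount g vis' < pvUCount g vis := by
  apply pvFilter_len_lt (n := n)
  · intro a ha
    simp only [Bool.not_eq_true'] at ha ⊢
    rcases Bool.eq_false_or_eq_true (vis.contains a) with hv | hv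
    · rw [h1 a hv] at ha; cases ha
    · exact hv
  · exact hn
  · simp [h3]
  · simp [h2]

-- ---- PySem.Set helpers ----

theorem pvSet_mem_add (s : PySem.Set String) (x z : String) :
    z ∈ PySem.Set.add s x ↔ z = x ∨ z ∈ s := by
  simp [PySem.Set.add]
  by_cases h : x ∈ s
  · simp [h]; intro hz; subst hz; exact h
  · simp [h, or_comm]

-- ---- B's remaining work measure: total adjacency length over unvisited keys ----

def pvWB (g : PySem.Dict String (List String)) (vis : PySem.Set String) : Nat :=
  ((g.items.filter (fun kv => ! decide (kv.1 ∈ vis))).map (fun kv => kv.2.length)).sum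

theorem pvWB_le (g : PySem.Dict String (List String)) (vis : PySem.Set String) :
    pvWB g vis ≤ ((PySem.Dict.values g).map List.length).sum := by
  unfold pvWB
  have hv : (PySem.Dict.values g).map List.length = g.items.map (fun kv => kv.2.length) := by
    show (g.items.map Prod.snd).map List.length = _
    simp [List.map_map]
  rw [hv]
  generalize g.items = L
  induction L with
  | nil => simp
  | cons a t ih =>
    by_cases h : a.1 ∈ vis <;> simp [List.filter_cons, h] <;> try omega

theorem pvWB_add_aux (vis : PySem.Set String) (x : String) (vx : List String) :
    ∀ L : List (String × List String), (L.map Prod.fst).Nodup → (x, vx) ∈ L → x ∉ vis →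
    ((L.filter (fun kv => ! decide (kv.1 = x ∨ kv.1 ∈ vis))).map (fun kv => kv.2.length)).sum
      + vx.length
    = ((L.filter (fun kv => ! decide (kv.1 ∈ vis))).map (fun kv => kv.2.length)).sum := by
  intro L
  induction L with
  | nil => intro _ hm; cases hm
  | cons a t ih =>
    intro hnd hm hv
    simp only [List.map_cons, List.nodup_cons] at hnd
    have hfe : ∀ (ht : x ∉ t.map Prod.fst),
        t.filter (fun kv => ! decide (kv.1 = x ∨ kv.1 ∈ vis))
          = t.filter (fun kv => ! decide (kv.1 ∈ vis)) := by
      intro ht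
      apply List.filter_congr
      intro kv hkv
      have hne : kv.1 ≠ x := by
        intro hc
        exact ht (by rw [← hc]; exact List.mem_map_of_mem hkv)
      simp [hne]
    rcases List.mem_cons.mp hm with he | hm'
    · subst he
      have hxt : x ∉ t.map Prod.fst := by simpa using hnd.1
      simp only [List.filter_cons]
      rw [hfe hxt]
      simp [hv]
      omega
    · have hne : a.1 ≠ x := by
        intro hc
        exact hnd.1 (by rw [hc]; exact List.mem_map_of_mem hm')
      have := ih hnd.2 hm' hv
      simp only [List.filter_cons, hne]
      by_cases h : a.1 ∈ vis <;> simp [h, hne] at this ⊢ <;> omega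

theorem pvWB_add (g : PySem.Dict String (List String)) (vis : PySem.Set String) (x : String)
    (hnd : g.keys.Nodup) (hx : x ∈ g.keys) (hv : x ∉ vis) :
    pvWB g (PySem.Set.add vis x) + (g.getD x []).length = pvWB g vis := by
  have hpair : ∃ vx, (x, vx) ∈ g.items := by
    have hx' : x ∈ g.items.map Prod.fst := hx
    obtain ⟨kv, hkv, he⟩ := List.mem_map.mp hx'
    exact ⟨kv.2, by rw [show (x, kv.2) = kv from by rw [← he]]; exact hkv⟩
  obtain ⟨vx, hvx⟩ := hpair
  have hgetD : g.getD x [] = vx := PySem.Dict.getD_of_mem_items g hvx hnd []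
  rw [hgetD]
  unfold pvWB
  have hbr : g.items.filter (fun kv => ! decide (kv.1 ∈ PySem.Set.add vis x))
      = g.items.filter (fun kv => ! decide (kv.1 = x ∨ kv.1 ∈ vis)) := by
    apply List.filter_congr
    intro kv _
    rw [decide_eq_decide.mpr (pvSet_mem_add vis x kv.1)]
  rw [hbr]
  exact pvWB_add_aux vis x vx g.items hnd hvx hv

-- ---- the two graph constructions build the same dict ----

theorem pvSetdefault_insert (g : PySem.Dict String (List String)) (u : String) (w : List String) :
    (g.setdefault u []).insert u ((g.setdefault u []).getD u [] ++ w)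
      = g.insert u (g.getD u [] ++ w) := by
  rcases Bool.eq_false_or_eq_true (g.contains u) with h | h
  · rw [PySem.Dict.setdefault_of_contains g [] h]
  · rw [PySem.Dict.setdefault_of_not_contains g [] h]
    rw [PySem.Dict.getD_insert_self g u []]
    rw [PySem.Dict.insert_insert_self]
    rw [PySem.Dict.getD_of_not_contains g [] h]

theorem pvBuild_eq (rows : List (List String)) : pvBuildB rows = pvBuildA rows := by
  unfold pvBuildB pvBuildA
  congr 1
  funext g each
  match each with
  | [] => rfl
  | [u] => rfl
  | u :: v :: rest =>
    show ((((g.setdefault u []).insert u ((g.setdefault u []).getD u [] ++ [v])).setdefault v []).insert v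
        ((((g.setdefault u []).insert u ((g.setdefault u []).getD u [] ++ [v])).setdefault v []).getD v [] ++ [u]))
        = pvAddEdgeA g u (some v)
    rw [pvSetdefault_insert g u [v]]
    rw [pvSetdefault_insert (g.insert u (g.getD u [] ++ [v])) v [u]]
    rfl

-- ---- invariants of the built graph: unique keys, adjacency closed under keys ----

theorem pvBuild_nodup (rows : List (List String)) : (pvBuildA rows).keys.Nodup := by
  unfold pvBuildA
  have : ∀ (rs : List (List String)) (g : PySem.Dict String (List String)),
      g.keys.Nodup → (rs.foldl (fun g each =>
        match each with
        | [] => g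
        | [u] => pvAddEdgeA g u none
        | u :: v :: _ => pvAddEdgeA g u (some v)) g).keys.Nodup := by
    intro rs
    induction rs with
    | nil => intro g hg; exact hg
    | cons r t ih =>
      intro g hg
      apply ih
      match r with
      | [] => exact hg
      | [u] => exact PySem.Dict.nodup_keys_insert g u [] hg
      | u :: v :: _ =>
        exact PySem.Dict.nodup_keys_insert _ v _ (PySem.Dict.nodup_keys_insert g u _ hg)
  exact this rows PySem.Dict.empty PySem.Dict.nodup_keys_empty

def pvKC (g : PySem.Dict String (List String)) : Prop :=
  ∀ k y, y ∈ g.getD k [] → y ∈ g.keys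

theorem pvAddEdge_KC (g : PySem.Dict String (List String)) (u : String) (v : Option String)
    (h : pvKC g) : pvKC (pvAddEdgeA g u v) := by
  match v with
  | none =>
    intro k y hy
    simp only [pvAddEdgeA] at hy ⊢
    rw [PySem.Dict.getD_insert] at hy
    rw [PySem.Dict.mem_keys_insert]
    by_cases hk : k = u
    · simp [hk] at hy
    · simp only [hk, if_false] at hy
      exact Or.inr (h k y hy)
  | some v =>
    intro k y hy
    simp only [pvAddEdgeA] at hy ⊢
    rw [PySem.Dict.mem_keys_insert, PySem.Dict.mem_keys_insert]
    rw [PySem.Dict.getD_insert] at hy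
    by_cases hkv : k = v
    · simp only [hkv, if_true] at hy
      rw [PySem.Dict.getD_insert] at hy
      rcases List.mem_append.mp hy with h1 | h1
      · by_cases hvu : v = u
        · simp only [hvu, if_true] at h1
          rcases List.mem_append.mp h1 with h2 | h2
          · exact Or.inr (Or.inr (h u y h2))
          · simp at h2; exact Or.inr (Or.inl h2)
        · simp only [hvu, if_false] at h1
          exact Or.inr (Or.inr (h v y h1))
      · simp at h1; exact Or.inr (Or.inl h1)
    · simp only [hkv, if_false] at hy
      rw [PySem.Dict.getD_insert] at hy
      by_cases hku : k = u
      · simp only [hku, if_true] at hy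
        rcases List.mem_append.mp hy with h1 | h1
        · exact Or.inr (Or.inr (h u y h1))
        · simp at h1; exact Or.inl h1
      · simp only [hku, if_false] at hy
        exact Or.inr (Or.inr (h k y hy))

theorem pvBuild_KC (rows : List (List String)) : pvKC (pvBuildA rows) := by
  unfold pvBuildA
  have : ∀ (rs : List (List String)) (g : PySem.Dict String (List String)),
      pvKC g → pvKC (rs.foldl (fun g each =>
        match each with
        | [] => g
        | [u] => pvAddEdgeA g u none
        | u :: v :: _ => pvAddEdgeA g u (some v)) g) := by
    intro rs
    induction rs with
    | nil => intro g hg; exact hg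
    | cons r t ih =>
      intro g hg
      apply ih
      match r with
      | [] => exact hg
      | [u] => exact pvAddEdge_KC g u none hg
      | u :: v :: _ => exact pvAddEdge_KC g u (some v) hg
  apply this
  intro k y hy
  simp [PySem.Dict.getD_empty] at hy

-- ---- characterization of A's recursive dfs: it returns the old visited set plus
-- everything reachable from the start node, and appends exactly the newly visited
-- nodes (other than the start) to curr ----

theorem pvDfsA_succ (g : PySem.Dict String (List String)) (f : Nat) (node : String)
    (curr : List String) (vis : PySem.Dict String Bool) :
    pvDfsA g (f+1) node (curr, vis)
      = if vis.contains node then (curr, vis)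
        else (g.getD node []).foldl
          (fun st neigh => if st.2.contains neigh then st
            else pvDfsA g f neigh (st.1 ++ [neigh], st.2))
          (curr, vis.insert node true) := rfl

theorem pvDfsFold_spec (g : PySem.Dict String (List String)) (hKC : pvKC g) (f : Nat)
    (IH : ∀ (node : String) (curr : List String) (vis : PySem.Dict String Bool),
      node ∈ g.keys → vis.contains node = false → pvUCount g vis < f →
      ∃ l vis',
        pvDfsA g f node (curr, vis) = (curr ++ l, vis') ∧
        (∀ z, vis'.contains z = true ↔
          (vis.contains z = true ∨
           PvReach g (fun w => vis.contains w = true) (fun w => w = node) z)) ∧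
        l.Nodup ∧
        (∀ z, z ∈ l ↔ (vis'.contains z = true ∧ vis.contains z = false ∧ z ≠ node))) :
    ∀ (ns : List String), (∀ n ∈ ns, n ∈ g.keys) →
    ∀ (curr : List String) (vis1 : PySem.Dict String Bool), pvUCount g vis1 < f →
    ∃ l vis',
      (ns.foldl (fun st neigh => if st.2.contains neigh then st
          else pvDfsA g f neigh (st.1 ++ [neigh], st.2)) (curr, vis1)) = (curr ++ l, vis') ∧
      (∀ z, vis'.contains z = true ↔
        (vis1.contains z = true ∨
         PvReach g (fun w => vis1.contains w = true) (fun w => w ∈ ns) z)) ∧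
      l.Nodup ∧
      (∀ z, z ∈ l ↔ (vis'.contains z = true ∧ vis1.contains z = false)) := by
  intro ns
  induction ns with
  | nil =>
    intro _ curr vis1 _
    refine ⟨[], vis1, by simp, ?_, by simp, ?_⟩
    · intro z
      constructor
      · exact Or.inl
      · rintro (h | h)
        · exact h
        · exact absurd h (fun c => pvReach_none (by simp) c)
    · intro z
      constructor
      · intro h; cases h
      · rintro ⟨h1, h2⟩; rw [h2] at h1; cases h1
  | cons n ns ih =>
    intro hks curr vis1 hcnt
    have hnk : n ∈ g.keys := hks n (List.mem_cons_self)
    simp only [List.foldl_cons]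
    rcases Bool.eq_false_or_eq_true (vis1.contains n) with hvn | hvn
    · -- n already visited: skipped
      simp only [hvn, if_true]
      obtain ⟨l, vis', heq, hiff, hnd, hmem⟩ :=
        ih (fun m hm => hks m (List.mem_cons_of_mem n hm)) curr vis1 hcnt
      refine ⟨l, vis', heq, ?_, hnd, hmem⟩
      intro z
      rw [hiff z]
      have : PvReach g (fun w => vis1.contains w = true) (fun w => w ∈ n :: ns) z ↔
          PvReach g (fun w => vis1.contains w = true) (fun w => w ∈ ns) z := by
        apply pvReach_congr (fun _ => Iff.rfl)
        intro w hw
        constructor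
        · intro hw2
          rcases List.mem_cons.mp hw2 with he | hm
          · exact absurd (he ▸ hvn) hw
          · exact hm
        · exact List.mem_cons_of_mem n
      rw [this]
    · -- n unvisited: recursive dfs call, then the rest of the fold
      simp only [hvn, if_false, Bool.false_eq_true]
      obtain ⟨l₁, vis₁, heq1, hiff1, hnd1, hmem1⟩ := IH n (curr ++ [n]) vis1 hnk hvn hcnt
      have hv1n : vis₁.contains n = true :=
        (hiff1 n).mpr (Or.inr (.base rfl (by simp [hvn])))
      have hmono1 : ∀ z, vis1.contains z = true → vis₁.contains z = true :=
        fun z hz => (hiff1 z).mpr (Or.inl hz)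
      have hlt : pvUCount g vis₁ < pvUCount g vis1 :=
        pvUCount_lt g vis1 vis₁ n hmono1 hv1n hvn hnk
      obtain ⟨l₂, vis₂, heq2, hiff2, hnd2, hmem2⟩ :=
        ih (fun m hm => hks m (List.mem_cons_of_mem n hm)) (curr ++ [n] ++ l₁) vis₁
          (by omega)
      have hmono2 : ∀ z, vis₁.contains z = true → vis₂.contains z = true :=
        fun z hz => (hiff2 z).mpr (Or.inl hz)
      refine ⟨(n :: l₁) ++ l₂, vis₂, ?_, ?_, ?_, ?_⟩
      · rw [heq1, heq2]; simp
      · intro z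
        have hsplit := @pvReach_split g (fun w => vis1.contains w = true)
          (fun w => w = n) (fun w => w ∈ ns) z
        have hsrc : PvReach g (fun w => vis1.contains w = true) (fun w => w ∈ n :: ns) z ↔
            PvReach g (fun w => vis1.contains w = true) (fun w => w = n ∨ w ∈ ns) z :=
          pvReach_congr (fun _ => Iff.rfl) (fun w _ => List.mem_cons)
        have hcg : PvReach g (fun w => vis₁.contains w = true) (fun w => w ∈ ns) z ↔
            PvReach g (fun w => vis1.contains w = true ∨
              PvReach g (fun w' => vis1.contains w' = true) (fun w' => w' = n) w)
              (fun w => w ∈ ns) z :=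
          pvReach_congr hiff1 (fun _ _ => Iff.rfl)
        rw [hiff2 z, hiff1 z, hsrc, hsplit, hcg]
        tauto
      · -- Nodup
        have hnin1 : n ∉ l₁ := fun hn => ((hmem1 n).mp hn).2.2 rfl
        have hnin2 : n ∉ l₂ := fun hn => by
          have := ((hmem2 n).mp hn).2
          rw [hv1n] at this; cases this
        have hdisj : l₁.Disjoint l₂ := by
          intro z hz1 hz2
          have h1 := ((hmem1 z).mp hz1).1
          have h2 := ((hmem2 z).mp hz2).2
          rw [h1] at h2; cases h2
        rw [List.cons_append, List.nodup_cons, List.nodup_append]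
        refine ⟨?_, hnd1, hnd2, fun a ha b hb he => hdisj ha (he ▸ hb)⟩
        intro hc
        rcases List.mem_append.mp hc with h | h
        · exact hnin1 h
        · exact hnin2 h
      · intro z
        constructor
        · intro hz
          rcases (by simpa using hz : z = n ∨ z ∈ l₁ ∨ z ∈ l₂) with he | hm | hm
          · subst he
            exact ⟨hmono2 _ hv1n, hvn⟩
          · have := (hmem1 z).mp hm
            exact ⟨hmono2 _ this.1, this.2.1⟩
          · have := (hmem2 z).mp hm
            refine ⟨this.1, ?_⟩
            rcases Bool.eq_false_or_eq_true (vis1.contains z) with h | h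
            · rw [hmono1 z h] at this; rcases this with ⟨_, c⟩; cases c
            · exact h
        · rintro ⟨hz2, hz0⟩
          rcases Bool.eq_false_or_eq_true (vis₁.contains z) with h1 | h1
          · by_cases he : z = n
            · subst he; exact List.mem_cons_self
            · exact List.mem_append.mpr
                (Or.inl (List.mem_cons_of_mem n ((hmem1 z).mpr ⟨h1, hz0, he⟩)))
          · exact List.mem_append.mpr (Or.inr ((hmem2 z).mpr ⟨hz2, h1⟩))

theorem pvDfsA_spec (g : PySem.Dict String (List String)) (hKC : pvKC g) :
    ∀ (f : Nat) (node : String) (curr : List String) (vis : PySem.Dict String Bool),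
    node ∈ g.keys → vis.contains node = false → pvUCount g vis < f →
    ∃ l vis',
      pvDfsA g f node (curr, vis) = (curr ++ l, vis') ∧
      (∀ z, vis'.contains z = true ↔
        (vis.contains z = true ∨
         PvReach g (fun w => vis.contains w = true) (fun w => w = node) z)) ∧
      l.Nodup ∧
      (∀ z, z ∈ l ↔ (vis'.contains z = true ∧ vis.contains z = false ∧ z ≠ node)) := by
  intro f
  induction f with
  | zero => intro node curr vis _ _ h; omega
  | succ f ihf =>
    intro node curr vis hnode hvnode hcnt
    rw [pvDfsA_succ, hvnode]
    simp only [Bool.false_eq_true, if_false]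
    have hv1 : ∀ z, (vis.insert node true).contains z = true ↔
        (z = node ∨ vis.contains z = true) := by
      intro z
      rw [PySem.Dict.contains_insert]
      simp
    have hv1n : (vis.insert node true).contains node = true := (hv1 node).mpr (Or.inl rfl)
    have hcnt1 : pvUCount g (vis.insert node true) < f := by
      have := pvUCount_lt g vis (vis.insert node true) node
        (fun z hz => (hv1 z).mpr (Or.inr hz)) hv1n hvnode hnode
      omega
    obtain ⟨l, vis', heq, hiff, hnd, hmem⟩ :=
      pvDfsFold_spec g hKC f ihf (g.getD node []) (fun m hm => hKC node m hm)
        curr (vis.insert node true) hcnt1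
    refine ⟨l, vis', heq, ?_, hnd, ?_⟩
    · intro z
      have hexp := @pvReach_expand g (fun w => vis.contains w = true) (fun _ => False)
        node z (by simp [hvnode])
      have hsrc1 : PvReach g (fun w => vis.contains w = true) (fun w => w = node) z ↔
          PvReach g (fun w => vis.contains w = true) (fun w => w = node ∨ False) z :=
        pvReach_congr (fun _ => Iff.rfl) (fun _ _ => by tauto)
      have hcg : PvReach g (fun w => (vis.insert node true).contains w = true)
            (fun w => w ∈ g.getD node []) z ↔
          PvReach g (fun w => vis.contains w = true ∨ w = node)
            (fun w => w ∈ g.getD node [] ∨ False) z :=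
        pvReach_congr (fun w => by rw [hv1 w]; tauto) (fun _ _ => by tauto)
      rw [hiff z, hv1 z, hcg, hsrc1, hexp]
      tauto
    · intro z
      rw [hmem z]
      have : (vis.insert node true).contains z = false ↔ ¬ (z = node ∨ vis.contains z = true) := by
        rw [← hv1 z]; simp
      constructor
      · rintro ⟨h1, h2⟩
        rw [this] at h2
        push_neg at h2
        rcases Bool.eq_false_or_eq_true (vis.contains z) with h | h
        · exact absurd h h2.2
        · exact ⟨h1, h, h2.1⟩
      · rintro ⟨h1, h2, h3⟩
        refine ⟨h1, ?_⟩
        rw [this]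
        push_neg
        exact ⟨h3, by simp [h2]⟩

-- ---- characterization of B's explicit-stack loop ----

theorem pvPush_mem (vis' : PySem.Set String) (l rest : List String) (z : String) :
    z ∈ l.foldl (fun st y => if PySem.Set.contains vis' y then st else y :: st) rest ↔
      ((z ∈ l ∧ z ∉ vis') ∨ z ∈ rest) := by
  induction l generalizing rest with
  | nil => simp
  | cons a t ih =>
    simp only [List.foldl_cons]
    rw [ih]
    by_cases h : a ∈ vis'
    · have : PySem.Set.contains vis' a = true := (PySem.Set.contains_iff vis' a).mpr h
      rw [this]
      simp only [if_true, List.mem_cons]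
      constructor
      · rintro (⟨h1, h2⟩ | h1)
        · exact Or.inl ⟨Or.inr h1, h2⟩
        · exact Or.inr h1
      · rintro (⟨h1 | h1, h2⟩ | h1)
        · exact absurd (h1 ▸ h) h2
        · exact Or.inl ⟨h1, h2⟩
        · exact Or.inr h1
    · have : PySem.Set.contains vis' a = false := by
        rcases Bool.eq_false_or_eq_true (PySem.Set.contains vis' a) with hc | hc
        · exact absurd ((PySem.Set.contains_iff vis' a).mp hc) h
        · exact hc
      rw [this]
      simp only [Bool.false_eq_true, if_false, List.mem_cons]
      constructor
      · rintro (⟨h1, h2⟩ | h1 | h1)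
        · exact Or.inl ⟨Or.inr h1, h2⟩
        · exact Or.inl ⟨Or.inl h1, h1 ▸ h⟩
        · exact Or.inr h1
      · rintro (⟨h1 | h1, h2⟩ | h1)
        · exact Or.inr (Or.inl h1)
        · exact Or.inl ⟨h1, h2⟩
        · exact Or.inr (Or.inr h1)

theorem pvPush_len (vis' : PySem.Set String) (l rest : List String) :
    (l.foldl (fun st y => if PySem.Set.contains vis' y then st else y :: st) rest).length
      ≤ rest.length + l.length := by
  induction l generalizing rest with
  | nil => simp
  | cons a t ih =>
    simp only [List.foldl_cons]
    rcases Bool.eq_false_or_eq_true (PySem.Set.contains vis' a) with h | h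
    · rw [h]
      simp only [if_true]
      have := ih rest
      simp at this ⊢
      omega
    · rw [h]
      simp only [Bool.false_eq_true, if_false]
      have := ih (a :: rest)
      simp at this ⊢
      omega

theorem pvLoopB_spec (g : PySem.Dict String (List String)) (hKC : pvKC g)
    (hnd : g.keys.Nodup) :
    ∀ (f : Nat) (stack : List String) (vis : PySem.Set String) (group : List String),
    (∀ x ∈ stack, x ∈ g.keys) → stack.length + pvWB g vis ≤ f →
    ∃ l vis',
      pvLoopB g f stack vis group = (vis', group ++ l) ∧
      (∀ z, z ∈ vis' ↔ (z ∈ vis ∨ PvReach g (fun w => w ∈ vis) (fun w => w ∈ stack) z)) ∧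
      l.Nodup ∧
      (∀ z, z ∈ l ↔ (z ∈ vis' ∧ z ∉ vis)) := by
  intro f
  induction f with
  | zero =>
    intro stack vis group hks hlen
    have : stack = [] := by
      cases stack with
      | nil => rfl
      | cons a t => simp at hlen
    subst this
    refine ⟨[], vis, by simp [pvLoopB], ?_, by simp, by simp⟩
    intro z
    constructor
    · exact Or.inl
    · rintro (h | h)
      · exact h
      · exact absurd h (fun c => pvReach_none (by simp) c)
  | succ f ihf =>
    intro stack vis group hks hlen
    match stack with
    | [] =>
      refine ⟨[], vis, by simp [pvLoopB], ?_, by simp, by simp⟩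
      intro z
      constructor
      · exact Or.inl
      · rintro (h | h)
        · exact h
        · exact absurd h (fun c => pvReach_none (by simp) c)
    | x :: rest =>
      have hxk : x ∈ g.keys := hks x List.mem_cons_self
      show ∃ l vis', (if PySem.Set.contains vis x then pvLoopB g f rest vis group
          else _) = _ ∧ _
      rcases Bool.eq_false_or_eq_true (PySem.Set.contains vis x) with hvx | hvx
      · -- x already visited: pop and continue
        rw [hvx]
        simp only [if_true]
        have hxv : x ∈ vis := (PySem.Set.contains_iff vis x).mp hvx
        obtain ⟨l, vis', heq, hiff, hnd', hmem⟩ :=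
          ihf rest vis group (fun m hm => hks m (List.mem_cons_of_mem x hm))
            (by simp at hlen ⊢; omega)
        refine ⟨l, vis', heq, ?_, hnd', hmem⟩
        intro z
        rw [hiff z]
        have : PvReach g (fun w => w ∈ vis) (fun w => w ∈ x :: rest) z ↔
            PvReach g (fun w => w ∈ vis) (fun w => w ∈ rest) z := by
          apply pvReach_congr (fun _ => Iff.rfl)
          intro w hw
          constructor
          · intro hw2
            rcases List.mem_cons.mp hw2 with he | hm
            · exact absurd (he ▸ hxv) hw
            · exact hm
          · exact List.mem_cons_of_mem x
        rw [this]
      · -- x unvisited: visit it, push its unvisited neighbours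
        rw [hvx]
        simp only [Bool.false_eq_true, if_false]
        have hxnv : x ∉ vis := fun c => by
          rw [(PySem.Set.contains_iff vis x).mpr c] at hvx; cases hvx
        have hmemadd : ∀ z, z ∈ PySem.Set.add vis x ↔ (z = x ∨ z ∈ vis) :=
          fun z => pvSet_mem_add vis x z
        have hwb : pvWB g (PySem.Set.add vis x) + (g.getD x []).length = pvWB g vis :=
          pvWB_add g vis x hnd hxk hxnv
        have hlen' :
            ((g.getD x []).foldl (fun st y =>
              if PySem.Set.contains (PySem.Set.add vis x) y then st else y :: st) rest).length
              + pvWB g (PySem.Set.add vis x) ≤ f := by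
          have h1 := pvPush_len (PySem.Set.add vis x) (g.getD x []) rest
          simp at hlen
          omega
        have hks' : ∀ m ∈ (g.getD x []).foldl (fun st y =>
            if PySem.Set.contains (PySem.Set.add vis x) y then st else y :: st) rest,
            m ∈ g.keys := by
          intro m hm
          rcases (pvPush_mem _ _ _ m).mp hm with ⟨h1, _⟩ | h1
          · exact hKC x m h1
          · exact hks m (List.mem_cons_of_mem x h1)
        obtain ⟨l, vis', heq, hiff, hnd', hmem⟩ :=
          ihf _ (PySem.Set.add vis x) (group ++ [x]) hks' hlen'
        have hxvis' : x ∈ vis' := (hiff x).mpr (Or.inl ((hmemadd x).mpr (Or.inl rfl)))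
        refine ⟨x :: l, vis', by rw [heq]; simp, ?_, ?_, ?_⟩
        · intro z
          rw [hiff z]
          have hexp := @pvReach_expand g (fun w => w ∈ vis) (fun w => w ∈ rest) x z hxnv
          have hsrc : PvReach g (fun w => w ∈ vis) (fun w => w ∈ x :: rest) z ↔
              PvReach g (fun w => w ∈ vis) (fun w => w = x ∨ w ∈ rest) z :=
            pvReach_congr (fun _ => Iff.rfl) (fun w _ => List.mem_cons)
          have hcg : PvReach g (fun w => w ∈ PySem.Set.add vis x)
                (fun w => w ∈ (g.getD x []).foldl (fun st y =>
                  if PySem.Set.contains (PySem.Set.add vis x) y then st else y :: st) rest) z ↔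
              PvReach g (fun w => w ∈ vis ∨ w = x)
                (fun w => w ∈ g.getD x [] ∨ w ∈ rest) z := by
            apply pvReach_congr
            · intro w; rw [hmemadd w]; tauto
            · intro w hw
              rw [pvPush_mem]
              constructor
              · rintro (⟨h1, _⟩ | h1)
                · exact Or.inl h1
                · exact Or.inr h1
              · rintro (h1 | h1)
                · exact Or.inl ⟨h1, hw⟩
                · exact Or.inr h1
          rw [hcg, hmemadd z, hsrc, hexp]
          tauto
        · -- Nodup (x :: l)
          rw [List.nodup_cons]
          refine ⟨fun hc => ?_, hnd'⟩
          have := ((hmem x).mp hc).2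
          exact this ((hmemadd x).mpr (Or.inl rfl))
        · intro z
          constructor
          · intro hz
            rcases List.mem_cons.mp hz with he | hm
            · subst he; exact ⟨hxvis', hxnv⟩
            · have := (hmem z).mp hm
              refine ⟨this.1, fun c => this.2 ((hmemadd z).mpr (Or.inr c))⟩
          · rintro ⟨h1, h2⟩
            by_cases he : z = x
            · exact he ▸ List.mem_cons_self
            · exact List.mem_cons_of_mem x
                ((hmem z).mpr ⟨h1, fun c => by
                  rcases (hmemadd z).mp c with h3 | h3
                  · exact he h3
                  · exact h2 h3⟩)

-- ---- glue: equal element sets (no duplicates) sort equally ----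

theorem pvSorted_eq (l1 l2 : List String) (h1 : l1.Nodup) (h2 : l2.Nodup)
    (h : ∀ z, z ∈ l1 ↔ z ∈ l2) :
    PySem.List.sorted l1 (fun x => x) false = PySem.List.sorted l2 (fun x => x) false :=
  PySem.List.sorted_eq_sorted_of_perm _ _ _ (fun _ _ hh => hh)
    ((List.perm_ext_iff_of_nodup h1 h2).mpr h)

-- the two outer-loop step functions (definitionally the fold bodies of the two ports)
def pvStepA (g : PySem.Dict String (List String)) :
    (List String × PySem.Dict String Bool) → String → (List String × PySem.Dict String Bool) :=
  fun st each =>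
    let largest := st.1
    let vis := st.2
    if ¬ (vis.contains each) then
      let r := pvDfsA g (PySem.Dict.size g + 1) each ([each], vis)
      let curr := r.1
      if curr.length > largest.length then
        (PySem.List.sorted curr (fun x => x) false, r.2)
      else if curr.length = largest.length then
        if PySem.List.pyGetD (PySem.List.sorted curr (fun x => x) false) 0 "" <
           PySem.List.pyGetD (PySem.List.sorted largest (fun x => x) false) 0 "" then
          (PySem.List.sorted curr (fun x => x) false, r.2)
        else (largest, r.2)
      else (largest, r.2)
    else (largest, vis)

def pvStepB (g : PySem.Dict String (List String)) :
    (List String × PySem.Set String) → String → (List String × PySem.Set String) :=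
  fun st start =>
    let best := st.1
    let vis := st.2
    if PySem.Set.contains vis start then (best, vis)
    else
      let r := pvLoopB g (1 + PySem.Dict.size g + ((PySem.Dict.values g).map List.length).sum)
                 [start] vis []
      let sg := PySem.List.sorted r.2 (fun x => x) false
      if sg.length > best.length ∨
         (sg.length = best.length ∧
          PySem.List.pyGetD sg 0 "" < PySem.List.pyGetD best 0 "") then
        (sg, r.1)
      else (best, r.1)

theorem pvOuter (g : PySem.Dict String (List String)) (hKC : pvKC g) (hnd : g.keys.Nodup) :
    ∀ (ks : List String), (∀ k ∈ ks, k ∈ g.keys) →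
    ∀ (bA : List String) (visA : PySem.Dict String Bool)
      (bB : List String) (visB : PySem.Set String),
    bA = bB → PySem.List.sorted bA (fun x => x) false = bA →
    (∀ z, visA.contains z = true ↔ z ∈ visB) →
    (ks.foldl (pvStepA g) (bA, visA)).1 = (ks.foldl (pvStepB g) (bB, visB)).1 := by
  intro ks
  induction ks with
  | nil => intro _ bA visA bB visB hb _ _; simpa using hb
  | cons k ks ih =>
    intro hks bA visA bB visB hb hsor hvis
    have hkk : k ∈ g.keys := hks k List.mem_cons_self
    have hkst : ∀ m ∈ ks, m ∈ g.keys := fun m hm => hks m (List.mem_cons_of_mem k hm)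
    simp only [List.foldl_cons]
    rcases Bool.eq_false_or_eq_true (visA.contains k) with hvk | hvk
    · -- k already visited in both
      have hvkB : PySem.Set.contains visB k = true :=
        (PySem.Set.contains_iff visB k).mpr ((hvis k).mp hvk)
      have e1 : pvStepA g (bA, visA) k = (bA, visA) := by
        unfold pvStepA
        simp [hvk]
      have e2 : pvStepB g (bB, visB) k = (bB, visB) := by
        have hkBm : k ∈ visB := (PySem.Set.contains_iff visB k).mp hvkB
        unfold pvStepB
        simp [hkBm]
      rw [e1, e2]
      exact ih hkst bA visA bB visB hb hsor hvis
    · -- k fresh: run dfs on the A side, the stack loop on the B side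
      have hkB : k ∉ visB := fun c => by rw [← hvis k] at c; rw [c] at hvk; cases hvk
      have hvkB : PySem.Set.contains visB k = false := by
        rcases Bool.eq_false_or_eq_true (PySem.Set.contains visB k) with h | h
        · exact absurd ((PySem.Set.contains_iff visB k).mp h) hkB
        · exact h
      obtain ⟨lA, visA', heqA, hiffA, hndA, hmemA⟩ :=
        pvDfsA_spec g hKC (PySem.Dict.size g + 1) k [k] visA hkk hvk
          (by have := pvUCount_le_size g visA; omega)
      obtain ⟨lB, visB', heqB, hiffB, hndB, hmemB⟩ :=
        pvLoopB_spec g hKC hnd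
          (1 + PySem.Dict.size g + ((PySem.Dict.values g).map List.length).sum)
          [k] visB [] (by intro m hm; simp at hm; subst hm; exact hkk)
          (by have := pvWB_le g visB; simp; omega)
      -- bridge between the two new visited sets
      have hvis' : ∀ z, visA'.contains z = true ↔ z ∈ visB' := by
        intro z
        rw [hiffA z, hiffB z]
        have hra : PvReach g (fun w => visA.contains w = true) (fun w => w = k) z ↔
            PvReach g (fun w => w ∈ visB) (fun w => w ∈ ([k] : List String)) z :=
          pvReach_congr hvis (fun w _ => by simp)
        rw [hra, hvis z]
      -- element sets of the two groups coincide
      have hvAk : visA'.contains k = true :=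
        (hiffA k).mpr (Or.inr (.base rfl (by simp [hvk])))
      have hmems : ∀ z, z ∈ ([k] ++ lA) ↔ z ∈ lB := by
        intro z
        rw [hmemB z]
        constructor
        · intro hz
          rcases List.mem_append.mp hz with h1 | h1
          · simp at h1
            subst h1
            exact ⟨(hvis' _).mp hvAk, hkB⟩
          · have := (hmemA z).mp h1
            refine ⟨(hvis' z).mp this.1, fun c => ?_⟩
            rw [← hvis z] at c
            rw [c] at this; rcases this.2 with ⟨c2, _⟩; cases c2
        · rintro ⟨h1, h2⟩
          by_cases he : z = k
          · subst he; exact List.mem_append.mpr (Or.inl (by simp))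
          · refine List.mem_append.mpr (Or.inr ((hmemA z).mpr ⟨(hvis' z).mpr h1, ?_, he⟩))
            rcases Bool.eq_false_or_eq_true (visA.contains z) with h | h
            · exact absurd ((hvis z).mp h) h2
            · exact h
      have hndA' : ([k] ++ lA).Nodup := by
        rw [List.singleton_append, List.nodup_cons]
        exact ⟨fun hc => ((hmemA k).mp hc).2.2 rfl, hndA⟩
      have hperm : ([k] ++ lA).Perm lB := (List.perm_ext_iff_of_nodup hndA' hndB).mpr hmems
      have hsort : PySem.List.sorted ([k] ++ lA) (fun x => x) false
          = PySem.List.sorted lB (fun x => x) false := pvSorted_eq _ _ hndA' hndB hmems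
      have hlen : ([k] ++ lA).length = lB.length := hperm.length_eq
      -- reduce the two step functions
      have e1 : pvStepA g (bA, visA) k =
          (if ([k] ++ lA).length > bA.length then
            (PySem.List.sorted ([k] ++ lA) (fun x => x) false, visA')
          else if ([k] ++ lA).length = bA.length then
            if PySem.List.pyGetD (PySem.List.sorted ([k] ++ lA) (fun x => x) false) 0 "" <
               PySem.List.pyGetD (PySem.List.sorted bA (fun x => x) false) 0 "" then
              (PySem.List.sorted ([k] ++ lA) (fun x => x) false, visA')
            else (bA, visA')
          else (bA, visA')) := by
        unfold pvStepA
        rw [if_pos (show ¬ (visA.contains k = true) by simp [hvk])]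
        rw [heqA]
      have e2 : pvStepB g (bB, visB) k =
          (if (PySem.List.sorted lB (fun x => x) false).length > bB.length ∨
              ((PySem.List.sorted lB (fun x => x) false).length = bB.length ∧
               PySem.List.pyGetD (PySem.List.sorted lB (fun x => x) false) 0 "" <
               PySem.List.pyGetD bB 0 "") then
            (PySem.List.sorted lB (fun x => x) false, visB')
          else (bB, visB')) := by
        unfold pvStepB
        simp only [hvkB, Bool.false_eq_true, if_false, heqB, List.nil_append]
      rw [e1, e2]
      rw [← hb, hsor, ← hsort, PySem.List.length_sorted]
      by_cases hgt : ([k] ++ lA).length > bA.length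
      · rw [if_pos hgt, if_pos (Or.inl (by omega))]
        exact ih hkst _ _ _ _ rfl (PySem.List.sorted_sorted _ _) hvis'
      · rw [if_neg hgt]
        by_cases heq : ([k] ++ lA).length = bA.length
        · rw [if_pos heq]
          by_cases hlt : PySem.List.pyGetD (PySem.List.sorted ([k] ++ lA) (fun x => x) false) 0 ""
              < PySem.List.pyGetD bA 0 ""
          · rw [if_pos hlt, if_pos (Or.inr ⟨heq, hlt⟩)]
            exact ih hkst _ _ _ _ rfl (PySem.List.sorted_sorted _ _) hvis'
          · rw [if_neg hlt, if_neg (by rintro (h | ⟨_, h⟩) <;> exact absurd h (by assumption))]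
            exact ih hkst _ _ _ _ rfl hsor hvis'
        · rw [if_neg heq, if_neg (by rintro (h | ⟨h, _⟩) <;> [exact hgt h; exact heq h])]
          exact ih hkst _ _ _ _ rfl hsor hvis'


-- ===== VERDICT (by name: the statement is the Claim_ definition above) =====
theorem largest_item_association_spec : Claim_equal_largest_item_association := by
  unfold Claim_equal_largest_item_association
  intro rows _ _
  unfold Spec_largest_item_association
  show largest_item_association rows = largest_item_association_alt rows
  have hKC := pvBuild_KC rows
  have hnd := pvBuild_nodup rows
  have hempty : ∀ z, (PySem.Dict.empty : PySem.Dict String Bool).contains z = true ↔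
      z ∈ (PySem.Set.empty : PySem.Set String) := by
    intro z
    constructor
    · intro h
      rw [PySem.Dict.contains_empty] at h
      cases h
    · intro h
      simp [PySem.Set.empty] at h
  have h := pvOuter (pvBuildA rows) hKC hnd (pvBuildA rows).keys (fun k hk => hk)
    [] PySem.Dict.empty [] PySem.Set.empty rfl rfl hempty
  calc largest_item_association rows
      = ((pvBuildA rows).keys.foldl (pvStepA (pvBuildA rows)) ([], PySem.Dict.empty)).1 := rfl
    _ = ((pvBuildA rows).keys.foldl (pvStepB (pvBuildA rows)) ([], PySem.Set.empty)).1 := h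
    _ = largest_item_association_alt rows := by
        unfold largest_item_association_alt
        rw [pvBuild_eq rows]
        rfl
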